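-- pv_equiv track=rewrite | github.com/wsgp2/telegram-smart-communicator | old/proxy_manager.py | assign_proxies_to_sessions
-- ===== SOURCE A (Python) =====
-- def assign_proxies_to_sessions(session_files, proxies, accounts_per_proxy):
--     if not proxies:
--         return [None] * len(session_files)
--
--     if len(proxies) == 1:
--         return [proxies[0]] * len(session_files)
--
--     assigned = []
--     for i, proxy in enumerate(proxies):
--         start_idx = i * accounts_per_proxy
--         end_idx = min((i + 1) * accounts_per_proxy, len(session_files))
--         for j in range(start_idx, end_idx):
--             if j < len(session_files):
--                 assigned.append(proxy)
--
--     remaining = len(session_files) - len(assigned)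
--     if remaining > 0:
--         for i in range(remaining):
--             proxy_idx = i % len(proxies)
--             assigned.append(proxies[proxy_idx])
--
--     return assigned
-- ===== SOURCE B (Python) =====
-- def assign_proxies_to_sessions(session_files, proxies, accounts_per_proxy):
--     n = len(session_files)
--     p = len(proxies)
--     if p == 0:
--         return [None] * n
--     cap = min(p * accounts_per_proxy, n) if accounts_per_proxy > 0 else 0
--     return [proxies[j // accounts_per_proxy] if j < cap else proxies[(j - cap) % p]
--             for j in range(n)]
-- ===== Notes on version B (the rewrite author's own statement) =====
-- stated objective: simpler
-- what changed: Replaces A's two sequential append loops (per-proxy block fill, then round-robin remainder) and its redundant single-proxy special case with one closed-form index formula evaluated in a single list-comprehension pass over the session positions.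
import Mathlib
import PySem

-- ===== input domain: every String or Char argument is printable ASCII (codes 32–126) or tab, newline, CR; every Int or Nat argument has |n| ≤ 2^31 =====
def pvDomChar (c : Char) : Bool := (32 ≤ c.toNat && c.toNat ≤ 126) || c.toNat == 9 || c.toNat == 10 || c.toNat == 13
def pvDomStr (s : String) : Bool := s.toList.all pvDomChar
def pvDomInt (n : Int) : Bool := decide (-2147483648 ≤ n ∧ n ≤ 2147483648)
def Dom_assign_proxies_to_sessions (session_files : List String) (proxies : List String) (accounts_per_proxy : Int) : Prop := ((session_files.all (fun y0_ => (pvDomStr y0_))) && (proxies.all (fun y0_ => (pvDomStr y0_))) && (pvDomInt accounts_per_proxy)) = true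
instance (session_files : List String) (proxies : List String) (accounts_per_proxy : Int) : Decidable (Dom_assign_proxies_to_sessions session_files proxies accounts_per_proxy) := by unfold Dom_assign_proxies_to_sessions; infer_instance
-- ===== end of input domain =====

-- B replaces A's two sequential append loops and single-proxy special case with one
-- closed-form index formula per position (objective: simpler).

-- ===== PORT A =====
def assign_proxies_to_sessions (session_files : List String) (proxies : List String) (accounts_per_proxy : Int) : List (Option String) :=
  if proxies = [] then
    List.replicate session_files.length none
  else if proxies.length = 1 then
    List.replicate session_files.length (PySem.List.pyGet? proxies 0)
  else
    let n : Int := (session_files.length : Int)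
    let assigned : List (Option String) :=
      (PySem.List.enumerate proxies 0).foldl (fun acc ip =>
        let start_idx : Int := ip.1 * accounts_per_proxy
        let end_idx : Int := min ((ip.1 + 1) * accounts_per_proxy) n
        (PySem.List.pyRange start_idx end_idx 1).foldl
          (fun acc2 j => if j < n then acc2 ++ [some ip.2] else acc2) acc) []
    let remaining : Int := n - (assigned.length : Int)
    if remaining > 0 then
      (PySem.List.pyRange 0 remaining 1).foldl
        (fun acc i => acc ++ [PySem.List.pyGet? proxies (PySem.Int.mod i (proxies.length : Int))]) assigned
    else assigned

-- ===== PORT B =====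
def assign_proxies_to_sessions_alt (session_files : List String) (proxies : List String) (accounts_per_proxy : Int) : List (Option String) :=
  let n : Int := (session_files.length : Int)
  let p : Int := (proxies.length : Int)
  if p = 0 then
    List.replicate session_files.length none
  else
    let cap : Int := if accounts_per_proxy > 0 then min (p * accounts_per_proxy) n else 0
    (PySem.List.pyRange 0 n 1).map (fun j =>
      if j < cap then PySem.List.pyGet? proxies (PySem.Int.floordiv j accounts_per_proxy)
      else PySem.List.pyGet? proxies (PySem.Int.mod (j - cap) p))

-- ===== PRECONDITION & SPEC =====
def Spec_assign_proxies_to_sessions (session_files : List String) (proxies : List String) (accounts_per_proxy : Int) (out : List (Option String)) : Prop := out = assign_proxies_to_sessions_alt session_files proxies accounts_per_proxy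
instance (session_files : List String) (proxies : List String) (accounts_per_proxy : Int) (out : List (Option String)) : Decidable (Spec_assign_proxies_to_sessions session_files proxies accounts_per_proxy out) := by unfold Spec_assign_proxies_to_sessions; infer_instance

-- ===== CLAIM (what is proved, stated in full; the proofs are below) =====
def Claim_equal_assign_proxies_to_sessions : Prop := ∀ (session_files : List String) (proxies : List String) (accounts_per_proxy : Int), Dom_assign_proxies_to_sessions session_files proxies accounts_per_proxy → Spec_assign_proxies_to_sessions session_files proxies accounts_per_proxy (assign_proxies_to_sessions session_files proxies accounts_per_proxy)

-- ===== LEMMAS AND PROOFS =====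

-- canonical form both ports are reduced to: block prefix indexed by k / a, then round-robin tail
def pvCanon (session_files proxies : List String) (app : Int) : List (Option String) :=
  (List.range (if 0 < app then min (proxies.length * app.toNat) session_files.length else 0)).map
      (fun k => some (PySem.List.pyGetD proxies ((k / app.toNat : Nat) : Int) ""))
    ++ (List.range (session_files.length - (if 0 < app then min (proxies.length * app.toNat) session_files.length else 0))).map
      (fun k => proxies[k % proxies.length]?)

-- split a map over List.range at position m
lemma map_range_split {β : Type} (n m : Nat) (h : m ≤ n) (f : Nat → β) :
    (List.range n).map f = (List.range m).map f ++ (List.range (n - m)).map (fun k => f (m + k)) := by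
  conv_lhs => rw [show n = m + (n - m) from by omega]
  rw [List.range_add, List.map_append, List.map_map]
  rfl

-- central combinatorial fact: concatenated per-proxy blocks = one list indexed by k / a
lemma flat_blocks_eq_map_range {β : Type} (a n : Nat) (g : Nat → β) (ha : 0 < a) :
    ∀ p : Nat, (List.range p).flatMap (fun i => List.replicate (min ((i+1)*a) n - i*a) (g i))
      = (List.range (min (p*a) n)).map (fun k => g (k / a)) := by
  intro p
  induction p with
  | zero => simp
  | succ p ih =>
    rw [List.range_succ, List.flatMap_append, ih]
    have hsplit : min ((p+1)*a) n = min (p*a) n + (min ((p+1)*a) n - p*a) := by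
      rcases Nat.le_total n (p*a) with h | h
      · have : min ((p+1)*a) n = n := by
          apply Nat.min_eq_right; calc n ≤ p*a := h
            _ ≤ (p+1)*a := Nat.mul_le_mul_right a (Nat.le_succ p)
        omega
      · have h1 : min (p*a) n = p*a := Nat.min_eq_left h
        have h2 : p*a ≤ min ((p+1)*a) n := by
          apply le_min _ h; exact Nat.mul_le_mul_right a (Nat.le_succ p)
        omega
    rw [hsplit, List.range_add, List.map_append]
    congr 1
    simp only [List.flatMap_singleton]
    set d := min ((p+1)*a) n - p*a with hd
    have hd_le : d ≤ a := by
      have : (p+1)*a = p*a + a := by ring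
      omega
    rcases Nat.eq_zero_or_pos d with h0 | hpos
    · simp [h0]
    · have hm : min (p*a) n = p*a := by
        apply Nat.min_eq_left
        by_contra hc
        have hc' : n < p * a := by omega
        have : min ((p+1)*a) n ≤ n := Nat.min_le_right _ _
        omega
      rw [List.map_map]
      have hcg : ∀ k ∈ List.range d, ((fun k => g (k / a)) ∘ (fun k => min (p*a) n + k)) k = g p := by
        intro k hk
        simp only [Function.comp, hm]
        have hk' : k < d := List.mem_range.mp hk
        have : (p*a + k) / a = p := by
          rw [Nat.mul_comm p a, Nat.mul_add_div ha]
          have : k / a = 0 := Nat.div_eq_of_lt (by omega)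
          omega
        rw [this]
      rw [List.map_congr_left hcg, List.map_const', List.length_range]

-- inner loop of A's block phase: conditional append with an always-true guard
lemma inner_block (n s e : Int) (he : e ≤ n) (v : Option String) (acc : List (Option String)) :
    (PySem.List.pyRange s e 1).foldl (fun acc2 j => if j < n then acc2 ++ [v] else acc2) acc
      = acc ++ List.replicate (e - s).toNat v := by
  have h1 : (PySem.List.pyRange s e 1).foldl (fun acc2 j => if j < n then acc2 ++ [v] else acc2) acc
      = (PySem.List.pyRange s e 1).foldl (fun acc2 _ => acc2 ++ [v]) acc := by
    apply PySem.List.foldl_congr_mem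
    intro acc2 j hj
    have := (PySem.List.mem_pyRange_one.mp hj).2
    simp [show j < n by omega]
  rw [h1, PySem.List.foldl_append_singleton_eq_map]
  congr 1
  rw [List.map_const', PySem.List.length_pyRange_one]

-- B equals the canonical form
lemma B_canon (session_files proxies : List String) (app : Int) (hp : proxies ≠ []) :
    assign_proxies_to_sessions_alt session_files proxies app = pvCanon session_files proxies app := by
  unfold assign_proxies_to_sessions_alt pvCanon
  have hp0 : 0 < proxies.length := List.length_pos_iff.mpr hp
  have hp' : ¬ ((proxies.length : Int) = 0) := by
    simpa using fun h => hp (List.length_eq_zero_iff.mp h)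
  simp only [hp', if_false]
  rw [PySem.List.pyRange_zero_natCast, List.map_map]
  have hmn : (if 0 < app then min (proxies.length * app.toNat) session_files.length else 0) ≤ session_files.length := by
    rcases (by omega : 0 < app ∨ app ≤ 0) with h | h
    · simp [if_pos h]
    · simp [if_neg (by omega : ¬ 0 < app)]
  rw [map_range_split session_files.length _ hmn]
  have hcap : (if app > 0 then min ((proxies.length : Int) * app) ((session_files.length : Nat) : Int) else 0)
      = ((if 0 < app then min (proxies.length * app.toNat) session_files.length else 0 : Nat) : Int) := by
    rcases (by omega : 0 < app ∨ app ≤ 0) with h | h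
    · have ha' : ((app.toNat : Int)) = app := Int.toNat_of_nonneg (by omega)
      rw [if_pos h, if_pos h]
      push_cast
      rw [ha']
    · rw [if_neg (by omega), if_neg (by omega)]
      simp
  congr 1
  · apply List.map_congr_left
    intro k hk
    have hk' : k < (if 0 < app then min (proxies.length * app.toNat) session_files.length else 0) := List.mem_range.mp hk
    have happ : 0 < app := by
      by_contra h
      rw [if_neg h] at hk'
      omega
    have hklt : ((k : Nat) : Int) < ((if 0 < app then min (proxies.length * app.toNat) session_files.length else 0 : Nat) : Int) :=
      Int.ofNat_lt.mpr hk'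
    rw [if_pos happ] at hk'
    simp only [Function.comp, hcap]
    rw [if_pos hklt]
    have ha' : ((app.toNat : Int)) = app := Int.toNat_of_nonneg (by omega)
    have hdiv : k / app.toNat < proxies.length := by
      have hkm : k < proxies.length * app.toNat := lt_of_lt_of_le hk' (Nat.min_le_left _ _)
      exact Nat.div_lt_of_lt_mul (Nat.mul_comm proxies.length app.toNat ▸ hkm)
    rw [show PySem.Int.floordiv ((k : Nat) : Int) app = (((k / app.toNat : Nat)) : Int) from by
          rw [← ha']; exact PySem.Int.floordiv_natCast k app.toNat]
    rw [PySem.List.pyGet?_natCast, List.getElem?_eq_getElem (by simpa using hdiv),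
        PySem.List.pyGetD_eq_getElem proxies "" (Int.natCast_nonneg _) (by exact_mod_cast hdiv)]
    simp
    have hidx : ((k : Int) / max app 0).toNat = k / app.toNat := by
      rw [show max app 0 = ((app.toNat : Int)) from by omega, ← Int.natCast_div, Int.toNat_natCast]
    simp only [hidx]
  · apply List.map_congr_left
    intro k hk
    simp only [Function.comp, hcap]
    have hge : ¬ ((((if 0 < app then min (proxies.length * app.toNat) session_files.length else 0) + k : Nat) : Int)
        < ((if 0 < app then min (proxies.length * app.toNat) session_files.length else 0 : Nat) : Int)) := by
      exact_mod_cast Nat.not_lt.mpr (Nat.le_add_right _ _)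
    rw [if_neg hge]
    have he : (((if 0 < app then min (proxies.length * app.toNat) session_files.length else 0) + k : Nat) : Int)
        - ((if 0 < app then min (proxies.length * app.toNat) session_files.length else 0 : Nat) : Int) = ((k : Nat) : Int) := by
      push_cast; omega
    rw [he, PySem.Int.mod_natCast, PySem.List.pyGet?_natCast]

-- A's block phase equals the canonical block prefix
set_option maxHeartbeats 1000000 in
lemma block_phase (session_files proxies : List String) (app : Int) :
    (PySem.List.enumerate proxies 0).foldl (fun acc ip =>
        (PySem.List.pyRange (ip.1 * app) (min ((ip.1 + 1) * app) ((session_files.length : Nat) : Int)) 1).foldl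
          (fun acc2 j => if j < ((session_files.length : Nat) : Int) then acc2 ++ [some ip.2] else acc2) acc) []
      = (List.range (if 0 < app then min (proxies.length * app.toNat) session_files.length else 0)).map
          (fun k => some (PySem.List.pyGetD proxies ((k / app.toNat : Nat) : Int) "")) := by
  have h1 : ∀ ip ∈ PySem.List.enumerate proxies 0, ∀ (acc : List (Option String)),
      (PySem.List.pyRange (ip.1 * app) (min ((ip.1 + 1) * app) ((session_files.length : Nat) : Int)) 1).foldl
          (fun acc2 j => if j < ((session_files.length : Nat) : Int) then acc2 ++ [some ip.2] else acc2) acc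
        = acc ++ List.replicate (min ((ip.1 + 1) * app) ((session_files.length : Nat) : Int) - ip.1 * app).toNat (some ip.2) := by
    intro ip _ acc
    exact inner_block _ _ _ (min_le_right _ _) _ _
  rw [PySem.List.foldl_congr_mem' _ _
        (fun acc ip => acc ++ List.replicate (min ((ip.1 + 1) * app) ((session_files.length : Nat) : Int) - ip.1 * app).toNat (some ip.2)) _ h1,
      PySem.List.foldl_append_eq_flatMap, List.nil_append,
      PySem.List.enumerate_eq_map_pyRange proxies "", PySem.List.len_eq,
      PySem.List.pyRange_zero_natCast, List.map_map, List.flatMap_map]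
  simp only [Function.comp_def]
  rcases (by omega : 0 < app ∨ app ≤ 0) with ha | ha
  · have ha' : ((app.toNat : Int)) = app := Int.toNat_of_nonneg (by omega)
    rw [if_pos ha]
    have hcongr : ∀ i ∈ List.range proxies.length,
        List.replicate (min (((i : Int) + 1) * app) ((session_files.length : Nat) : Int) - (i : Int) * app).toNat
            (some (PySem.List.pyGetD proxies (i : Int) ""))
        = List.replicate (min ((i+1)*app.toNat) session_files.length - i*app.toNat)
            (some (PySem.List.pyGetD proxies (i : Int) "")) := by
      intro i _
      congr 1
      have e1 : ((i : Int) + 1) * app = (((i+1)*app.toNat : Nat) : Int) := by push_cast; rw [ha']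
      have e2 : (i : Int) * app = ((i*app.toNat : Nat) : Int) := by push_cast; rw [ha']
      rw [e1, e2]
      generalize (i+1)*app.toNat = Y
      generalize i*app.toNat = X
      omega
    rw [List.flatMap_congr hcongr]
    exact flat_blocks_eq_map_range app.toNat session_files.length
      (fun i => some (PySem.List.pyGetD proxies (i : Int) "")) (by omega) proxies.length
  · rw [if_neg (by omega)]
    simp only [List.range_zero, List.map_nil]
    apply List.flatMap_eq_nil_iff.mpr
    intro i _
    rw [List.replicate_eq_nil_iff]
    have e1 : ((i : Int) + 1) * app = (i : Int) * app + app := by ring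
    rw [e1]
    generalize (i : Int) * app = X
    omega

-- round-robin tail of A: fold-append over a range becomes a map over List.range
lemma tail_loop (proxies : List String) (r : Nat) (acc : List (Option String)) :
    (PySem.List.pyRange 0 (r : Int) 1).foldl
      (fun acc i => acc ++ [PySem.List.pyGet? proxies (PySem.Int.mod i (proxies.length : Int))]) acc
      = acc ++ (List.range r).map (fun k => proxies[k % proxies.length]?) := by
  rw [PySem.List.foldl_append_singleton_eq_map, PySem.List.pyRange_zero_natCast, List.map_map]
  congr 1
  apply List.map_congr_left
  intro k _
  simp only [Function.comp]
  rw [PySem.Int.mod_natCast, PySem.List.pyGet?_natCast]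

-- A's single-proxy branch also matches B
lemma one_proxy (session_files proxies : List String) (app : Int) (h1 : proxies.length = 1) :
    List.replicate session_files.length (PySem.List.pyGet? proxies 0)
      = assign_proxies_to_sessions_alt session_files proxies app := by
  have hp : proxies ≠ [] := by intro h; rw [h] at h1; simp at h1
  have hp0 : 0 < proxies.length := by omega
  rw [PySem.List.pyGet?_zero, B_canon _ _ _ hp]
  unfold pvCanon
  rw [h1]
  have hma : (if 0 < app then min (1 * app.toNat) session_files.length else 0) ≤ app.toNat := by
    rcases (by omega : 0 < app ∨ app ≤ 0) with h | h
    · rw [if_pos h]; simp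
    · rw [if_neg (by omega)]; omega
  have hmn : (if 0 < app then min (1 * app.toNat) session_files.length else 0) ≤ session_files.length := by
    rcases (by omega : 0 < app ∨ app ≤ 0) with h | h
    · rw [if_pos h]; exact Nat.min_le_right _ _
    · rw [if_neg (by omega)]; omega
  conv_lhs => rw [show session_files.length
      = (if 0 < app then min (1 * app.toNat) session_files.length else 0)
        + (session_files.length - (if 0 < app then min (1 * app.toNat) session_files.length else 0)) from by omega,
    List.replicate_add]
  have hz : proxies[0]? = some proxies[0] := List.getElem?_eq_getElem hp0
  congr 1
  · symm
    have hconst : ∀ k ∈ List.range (if 0 < app then min (1 * app.toNat) session_files.length else 0),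
        (fun k => some (PySem.List.pyGetD proxies ((k / app.toNat : Nat) : Int) "")) k = proxies[0]? := by
      intro k hk
      have hk' := List.mem_range.mp hk
      have happ : 0 < app := by
        by_contra h
        rw [if_neg h] at hk'
        omega
      rw [if_pos happ] at hk'
      have hdiv : k / app.toNat = 0 := Nat.div_eq_of_lt (by omega)
      simp only [hdiv, Nat.cast_zero]
      rw [PySem.List.pyGetD_eq_getElem proxies "" le_rfl (by exact_mod_cast hp0), hz]
      rfl
    rw [List.map_congr_left hconst, List.map_const', List.length_range]
  · symm
    have hconst : ∀ k ∈ List.range (session_files.length - (if 0 < app then min (1 * app.toNat) session_files.length else 0)),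
        (fun k => proxies[k % 1]?) k = proxies[0]? := by
      intro k _
      simp [Nat.mod_one]
    rw [List.map_congr_left hconst, List.map_const', List.length_range]

-- A's generic branch equals the canonical form
lemma A_canon (session_files proxies : List String) (app : Int) (hp : proxies ≠ []) (h1 : ¬ proxies.length = 1) :
    assign_proxies_to_sessions session_files proxies app = pvCanon session_files proxies app := by
  unfold assign_proxies_to_sessions
  rw [if_neg hp, if_neg h1]
  simp only []
  rw [block_phase session_files proxies app]
  rw [List.length_map, List.length_range]
  have hmn : (if 0 < app then min (proxies.length * app.toNat) session_files.length else 0) ≤ session_files.length := by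
    rcases (by omega : 0 < app ∨ app ≤ 0) with h | h
    · rw [if_pos h]; exact Nat.min_le_right _ _
    · rw [if_neg (by omega)]; omega
  by_cases hrem : ((session_files.length : Nat) : Int)
      - ((if 0 < app then min (proxies.length * app.toNat) session_files.length else 0 : Nat) : Int) > 0
  · rw [if_pos hrem]
    rw [show ((session_files.length : Nat) : Int)
          - ((if 0 < app then min (proxies.length * app.toNat) session_files.length else 0 : Nat) : Int)
        = ((session_files.length - (if 0 < app then min (proxies.length * app.toNat) session_files.length else 0) : Nat) : Int) from by omega]
    rw [tail_loop]
    rfl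
  · rw [if_neg hrem]
    unfold pvCanon
    rw [show session_files.length - (if 0 < app then min (proxies.length * app.toNat) session_files.length else 0) = 0 from by omega,
        List.range_zero, List.map_nil, List.append_nil]

-- ===== VERDICT (by name: the statement is the Claim_ definition above) =====
theorem assign_proxies_to_sessions_spec : Claim_equal_assign_proxies_to_sessions := by
  intro session_files proxies app _
  unfold Spec_assign_proxies_to_sessions
  by_cases hnil : proxies = []
  · subst hnil
    unfold assign_proxies_to_sessions assign_proxies_to_sessions_alt
    simp
  · by_cases h1 : proxies.length = 1
    · rw [show assign_proxies_to_sessions session_files proxies app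
          = List.replicate session_files.length (PySem.List.pyGet? proxies 0) from by
            unfold assign_proxies_to_sessions; rw [if_neg hnil, if_pos h1]]
      exact one_proxy session_files proxies app h1
    · rw [A_canon session_files proxies app hnil h1, B_canon session_files proxies app hnil]
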